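-- pv_equiv track=rewrite | github.com/karankumbhar47/Crypto_Assignments | Assignment_2/Question_05/code/experiment_6_9.py | filterMessage
-- ===== SOURCE A (Python) =====
-- def filterMessage(output1, output2):
--     """
--     Checks if the difference has specific characteristics in its nibbles to determine
--     if the pair is valid.
--
--     @param output1: First output value (ciphertext).
--     @param output2: Second output value (ciphertext).
--     @return: True if the pair meets the filtering criteria, False otherwise.
--     """
--     diff = output1 ^ output2
--     parts = [(diff >> (4 * j)) & 15 for j in range(4)]
--
--     if (parts[0] != 0 or parts[2] != 0 or parts[3] != 0):
--         return False
--     if (parts[1] in {1, 2, 9, 10}):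
--         return True
--
--     return False
-- ===== SOURCE B (Python) =====
-- def filterMessage(output1, output2):
--     """Same check as A via a single masked membership test: the low 16 bits of the
--     XOR difference must be exactly one of the four allowed nibble-1 patterns."""
--     return (output1 ^ output2) & 0xFFFF in {0x10, 0x20, 0x90, 0xA0}
-- ===== Notes on version B (the rewrite author's own statement) =====
-- stated objective: simpler
-- what changed: Replaced the per-nibble decomposition (comprehension building a parts list plus a branch cascade) by one masked membership test: (output1 ^ output2) & 0xFFFF in {0x10, 0x20, 0x90, 0xA0}.
import Mathlib
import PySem

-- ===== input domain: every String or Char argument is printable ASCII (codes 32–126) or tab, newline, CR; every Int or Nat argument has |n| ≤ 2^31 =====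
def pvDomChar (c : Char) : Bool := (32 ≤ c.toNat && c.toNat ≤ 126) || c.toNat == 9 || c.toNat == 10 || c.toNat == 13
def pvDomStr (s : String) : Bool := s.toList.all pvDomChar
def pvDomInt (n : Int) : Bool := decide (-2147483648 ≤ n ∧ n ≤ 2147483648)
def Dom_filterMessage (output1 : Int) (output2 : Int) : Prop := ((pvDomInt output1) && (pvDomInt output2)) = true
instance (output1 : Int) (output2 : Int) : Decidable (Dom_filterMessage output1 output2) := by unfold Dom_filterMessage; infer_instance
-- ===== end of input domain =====

-- B replaces A's per-nibble parts list and branch cascade by a single masked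
-- membership test ((output1 ^ output2) & 0xFFFF in {0x10,0x20,0x90,0xA0}); objective: simpler.


-- ===== PORT A =====
-- Literal transliteration of A: diff, the 4-element parts list built by the
-- comprehension over range(4), then the two branches. parts[0..3] are always in
-- range (the list has length 4), so pyGetD with default 0 is the exact lookup.
def filterMessage (output1 : Int) (output2 : Int) : Bool :=
  let diff := PySem.Int.bxor output1 output2
  let parts := (PySem.List.pyRange 0 4 1).map (fun j => PySem.Int.band (diff >>> (4 * j).toNat) 15)
  if (PySem.List.pyGetD parts 0 0 != 0 || PySem.List.pyGetD parts 2 0 != 0 || PySem.List.pyGetD parts 3 0 != 0) then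
    false
  else if (PySem.Set.ofList [(1:Int), 2, 9, 10]).contains (PySem.List.pyGetD parts 1 0) then
    true
  else
    false

-- ===== PORT B =====
def filterMessage_alt (output1 : Int) (output2 : Int) : Bool :=
  (PySem.Set.ofList [(0x10:Int), 0x20, 0x90, 0xA0]).contains
    (PySem.Int.band (PySem.Int.bxor output1 output2) 0xFFFF)

-- ===== PRECONDITION & SPEC =====
def Spec_filterMessage (output1 : Int) (output2 : Int) (out : Bool) : Prop := out = filterMessage_alt output1 output2
instance (output1 : Int) (output2 : Int) (out : Bool) : Decidable (Spec_filterMessage output1 output2 out) := by unfold Spec_filterMessage; infer_instance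

-- ===== CLAIM (what is proved, stated in full; the proofs are below) =====
def Claim_equal_filterMessage : Prop := ∀ (output1 : Int) (output2 : Int), Dom_filterMessage output1 output2 → Spec_filterMessage output1 output2 (filterMessage output1 output2)

-- ===== LEMMAS AND PROOFS =====

-- Python's n >> k on Int is floor division by 2^k (= Lean's ediv for the positive divisor).
theorem pv_shr_ediv (a : Int) (k : Nat) : a >>> k = a / (2 ^ k : Int) := by
  rw [Int.shiftRight_eq]
  cases a with
  | ofNat n =>
      show (Int.ofNat (n >>> k)) = _
      rw [Nat.shiftRight_eq_div_pow, Int.ofNat_eq_natCast, Int.natCast_div]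
      push_cast; rfl
  | negSucc n =>
      show (Int.negSucc (n >>> k)) = _
      rw [Nat.shiftRight_eq_div_pow, Int.negSucc_ediv _ (by positivity), Int.negSucc_eq]
      have h : (↑n : Int).ediv (2 ^ k) = ↑(n / 2 ^ k) := by
        rw [Int.natCast_div]; rfl
      rw [h]

-- a & 15 is the low nibble, i.e. a mod 16 (Python-exact on negatives).
theorem pv_band_mask16 (a : Int) : PySem.Int.band a 15 = a % 16 := by
  unfold PySem.Int.band
  by_cases ha : 0 ≤ a
  · simp only [ha, if_true, show (0:Int) ≤ 15 by norm_num]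
    have h := Nat.and_two_pow_sub_one_eq_mod a.toNat 4
    norm_num at h
    rw [show ((15:Int)).toNat = 15 from rfl, h]
    omega
  · simp only [ha, if_true, if_false, show (0:Int) ≤ 15 by norm_num]
    set t := (-a - 1).toNat with ht
    have h := Nat.and_two_pow_sub_one_eq_mod t 4
    norm_num at h
    rw [show ((15:Int)).toNat = 15 from rfl, Nat.and_comm, h]
    omega

-- a & 0xFFFF is the low 16 bits, i.e. a mod 65536 (Python-exact on negatives).
theorem pv_band_mask65535 (a : Int) : PySem.Int.band a 65535 = a % 65536 := by
  unfold PySem.Int.band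
  by_cases ha : 0 ≤ a
  · simp only [ha, if_true, show (0:Int) ≤ 65535 by norm_num]
    have h := Nat.and_two_pow_sub_one_eq_mod a.toNat 16
    norm_num at h
    rw [show ((65535:Int)).toNat = 65535 from rfl, h]
    omega
  · simp only [ha, if_true, if_false, show (0:Int) ≤ 65535 by norm_num]
    set t := (-a - 1).toNat with ht
    have h := Nat.and_two_pow_sub_one_eq_mod t 16
    norm_num at h
    rw [show ((65535:Int)).toNat = 65535 from rfl, Nat.and_comm, h]
    omega

-- ===== VERDICT (by name: the statement is the Claim_ definition above) =====
theorem filterMessage_spec : Claim_equal_filterMessage := by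
  intro output1 output2 _
  unfold Spec_filterMessage filterMessage filterMessage_alt
  set d := PySem.Int.bxor output1 output2 with hd
  have hR : PySem.List.pyRange 0 4 1 = [0, 1, 2, 3] := by decide
  have hS1 : PySem.Set.ofList [(1:Int), 2, 9, 10] = [1, 2, 9, 10] := by decide
  have hS2 : PySem.Set.ofList [(0x10:Int), 0x20, 0x90, 0xA0] = [16, 32, 144, 160] := by decide
  rw [hR, hS1, hS2]
  have s0 : d >>> (0:Int) = d := by
    rw [show d >>> (0:Int) = d >>> (0:Nat) from Int.shiftRight_natCast_right d 0, pv_shr_ediv]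
    norm_num
  have s4 : d >>> (4:Int) = d / 16 := by
    rw [show d >>> (4:Int) = d >>> (4:Nat) from Int.shiftRight_natCast_right d 4, pv_shr_ediv]
    norm_num
  have s8 : d >>> (8:Int) = d / 256 := by
    rw [show d >>> (8:Int) = d >>> (8:Nat) from Int.shiftRight_natCast_right d 8, pv_shr_ediv]
    norm_num
  have s12 : d >>> (12:Int) = d / 4096 := by
    rw [show d >>> (12:Int) = d >>> (12:Nat) from Int.shiftRight_natCast_right d 12, pv_shr_ediv]
    norm_num
  simp only [List.map, pv_band_mask16, pv_band_mask65535]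
  norm_num [PySem.List.pyGetD, PySem.List.pyGet?, PySem.List.pyIdx?]
  simp only [show Int.toNat 2 = 2 from rfl, show Int.toNat 3 = 3 from rfl,
    List.getElem_cons_zero, List.getElem_cons_succ]
  simp only [s0, s4, s8, s12]
  rw [Bool.eq_iff_iff]
  simp only [Bool.and_eq_true, Bool.or_eq_true, decide_eq_true_eq]
  omega
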